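-- pv_equiv track=rewrite | github.com/NikolayShepelev/Python_labs | lab1_1_1.py | sum_divider
-- ===== SOURCE A (Python) =====
-- def sum_divider(n):
--     sum = 0
--     for i in range(4, n+1):
--         if n % i == 0:
--             delit = i
--             for j in range(4, delit+1):
--                 if delit % j == 0:
--                     sum += delit
--                     break
--     return sum
-- ===== SOURCE B (Python) =====
-- def sum_divider(n):
--     # Sum of divisors of n that are >= 4, via divisor pairs up to sqrt(n).
--     if n < 4:
--         return 0
--     total = 0
--     i = 1
--     while i * i <= n:
--         if n % i == 0:
--             if i >= 4:
--                 total += i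
--             j = n // i
--             if j != i and j >= 4:
--                 total += j
--         i += 1
--     return total
-- ===== Notes on version B (the rewrite author's own statement) =====
-- stated objective: faster
-- what changed: A scans every i in 4..n and re-discovers each divisor with a redundant inner loop; B enumerates divisor pairs (i, n//i) for i up to sqrt(n) and sums the members that are >= 4.
import Mathlib
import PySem

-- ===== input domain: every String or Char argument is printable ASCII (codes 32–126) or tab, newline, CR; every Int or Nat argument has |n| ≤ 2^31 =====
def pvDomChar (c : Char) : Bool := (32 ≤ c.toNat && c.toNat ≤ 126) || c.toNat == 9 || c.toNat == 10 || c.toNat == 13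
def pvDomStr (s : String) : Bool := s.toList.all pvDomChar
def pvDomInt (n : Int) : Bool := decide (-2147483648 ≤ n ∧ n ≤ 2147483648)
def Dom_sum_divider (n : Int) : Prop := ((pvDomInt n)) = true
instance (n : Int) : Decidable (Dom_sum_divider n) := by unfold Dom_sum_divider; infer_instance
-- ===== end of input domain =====

-- B replaces A's full scan of 4..n (with a redundant inner divisor scan) by an
-- enumeration of divisor pairs (i, n//i) for i up to sqrt(n): asymptotically faster.

-- ===== PORT A =====
def sum_divider (n : Int) : Int :=
  (PySem.List.pyRange 4 (n + 1) 1).foldl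
    (fun s i =>
      if PySem.Int.mod n i == 0 then
        let delit := i
        -- inner 'for j …: if delit % j == 0: sum += delit; break' adds delit once
        -- iff some j in range(4, delit+1) divides delit
        if (PySem.List.pyRange 4 (delit + 1) 1).any (fun j => PySem.Int.mod delit j == 0)
        then s + delit else s
      else s) 0

-- ===== PORT B =====
-- fuel is only a totality guard: (n+1).toNat steps always exceed the loop's trip count
def pvBLoop (fuel : Nat) (n i total : Int) : Int :=
  match fuel with
  | 0 => total
  | fuel + 1 =>
    if i * i ≤ n then
      pvBLoop fuel n (i + 1)
        (if PySem.Int.mod n i == 0 then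
          (if 4 ≤ i then total + i else total) +
            (if PySem.Int.floordiv n i ≠ i ∧ 4 ≤ PySem.Int.floordiv n i
             then PySem.Int.floordiv n i else 0)
         else total)
    else total

def sum_divider_alt (n : Int) : Int :=
  if n < 4 then 0 else pvBLoop (n + 1).toNat n 1 0

-- ===== PRECONDITION & SPEC =====
def Spec_sum_divider (n : Int) (out : Int) : Prop := out = sum_divider_alt n
instance (n : Int) (out : Int) : Decidable (Spec_sum_divider n out) := by unfold Spec_sum_divider; infer_instance

-- ===== CLAIM (what is proved, stated in full; the proofs are below) =====
def Claim_equal_sum_divider : Prop := ∀ (n : Int), Dom_sum_divider n → Spec_sum_divider n (sum_divider n)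

-- ===== LEMMAS AND PROOFS =====

-- the divisors of n in 4..n whose pair (d, n/d) has both members ≥ i
def pvT (n i : Int) : Finset Int :=
  (PySem.List.pyRange 4 (n + 1) 1).toFinset.filter
    (fun d => n % d = 0 ∧ i ≤ d ∧ i ≤ n / d)

theorem mem_pvT (n i d : Int) :
    d ∈ pvT n i ↔ (4 ≤ d ∧ d < n + 1) ∧ n % d = 0 ∧ i ≤ d ∧ i ≤ n / d := by
  simp only [pvT, Finset.mem_filter, List.mem_toFinset, PySem.List.mem_pyRange_one]

theorem pvT_empty (n i : Int) (hi : 1 ≤ i) (h : n < i * i) : pvT n i = ∅ := by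
  ext d
  simp only [mem_pvT, Finset.notMem_empty, iff_false]
  rintro ⟨⟨h4, hdn⟩, hmod, h1, h2⟩
  have hdvd : d ∣ n := Int.dvd_of_emod_eq_zero hmod
  have : d * (n / d) = n := Int.mul_ediv_cancel' hdvd
  nlinarith

-- what B's body adds to the accumulator at step i
def pvContrib (n i : Int) : Int :=
  if n % i = 0 then
    (if 4 ≤ i then i else 0) + (if n / i ≠ i ∧ 4 ≤ n / i then n / i else 0)
  else 0

theorem pvStep (n i : Int) (hi : 1 ≤ i) (hii : i * i ≤ n) :
    ∑ d ∈ pvT n i, d = pvContrib n i + ∑ d ∈ pvT n (i + 1), d := by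
  have hipos : (0:Int) < i := hi
  have hile : i ≤ n := by nlinarith
  have hsplit : pvT n i = pvT n (i + 1) ∪
      ((PySem.List.pyRange 4 (n + 1) 1).toFinset.filter
        (fun d => n % d = 0 ∧ (i ≤ d ∧ i ≤ n / d) ∧ (d = i ∨ n / d = i))) := by
    ext d
    simp only [mem_pvT, Finset.mem_union, Finset.mem_filter, List.mem_toFinset,
      PySem.List.mem_pyRange_one]
    constructor
    · rintro ⟨hr, hm, h1, h2⟩
      by_cases hc : i + 1 ≤ d ∧ i + 1 ≤ n / d
      · exact Or.inl ⟨hr, hm, hc⟩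
      · exact Or.inr ⟨hr, hm, ⟨h1, h2⟩, by omega⟩
    · rintro (⟨hr, hm, h1, h2⟩ | ⟨hr, hm, ⟨h1, h2⟩, _⟩)
      · exact ⟨hr, hm, by omega, by omega⟩
      · exact ⟨hr, hm, h1, h2⟩
  have hdisj : Disjoint (pvT n (i + 1))
      ((PySem.List.pyRange 4 (n + 1) 1).toFinset.filter
        (fun d => n % d = 0 ∧ (i ≤ d ∧ i ≤ n / d) ∧ (d = i ∨ n / d = i))) := by
    rw [Finset.disjoint_left]
    intro d hd hd'
    rw [mem_pvT] at hd
    simp only [Finset.mem_filter] at hd'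
    omega
  rw [hsplit, Finset.sum_union hdisj, pvContrib]
  by_cases hmod : n % i = 0
  · have hdvd : i ∣ n := Int.dvd_of_emod_eq_zero hmod
    have hq : i ≤ n / i := (Int.le_ediv_iff_mul_le hipos).mpr hii
    have hqn : n / i ≤ n := Int.ediv_le_self i (by omega)
    have hiq : i * (n / i) = n := Int.mul_ediv_cancel' hdvd
    have hqdvd : (n / i) ∣ n := ⟨i, by linarith [mul_comm i (n / i)]⟩
    have hqpos : (0:Int) < n / i := by nlinarith
    have hback : n / (n / i) = i :=
      calc n / (n / i) = (n / i) * i / (n / i) := by rw [mul_comm]; rw [hiq]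
        _ = i := Int.mul_ediv_cancel_left i (by omega)
    have hChar : ∀ d : Int,
        d ∈ (PySem.List.pyRange 4 (n + 1) 1).toFinset.filter
          (fun d => n % d = 0 ∧ (i ≤ d ∧ i ≤ n / d) ∧ (d = i ∨ n / d = i))
        ↔ (d = i ∨ d = n / i) ∧ 4 ≤ d := by
      intro d
      simp only [Finset.mem_filter, List.mem_toFinset, PySem.List.mem_pyRange_one]
      constructor
      · rintro ⟨⟨h4, hdn⟩, hm, ⟨h1, h2⟩, hd | hd⟩
        · exact ⟨Or.inl hd, h4⟩
        · have hddvd : d ∣ n := Int.dvd_of_emod_eq_zero hm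
          have hmul : d * i = n := by
            have := Int.mul_ediv_cancel' hddvd
            rw [hd] at this; exact this
          have hdni : n / i = d := by
            rw [← hmul]; exact Int.mul_ediv_cancel d (show i ≠ 0 by omega)
          exact ⟨Or.inr hdni.symm, h4⟩
      · rintro ⟨hd | hd, h4⟩
        · exact ⟨⟨h4, by omega⟩, by rw [hd]; exact hmod,
            ⟨by omega, by rw [hd]; exact hq⟩, Or.inl hd⟩
        · exact ⟨⟨h4, by omega⟩, by rw [hd]; exact Int.emod_eq_zero_of_dvd hqdvd,
            ⟨by omega, by rw [hd, hback]⟩, Or.inr (by rw [hd, hback])⟩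
    rw [if_pos hmod]
    by_cases hqi : n / i = i
    · have hNew : (PySem.List.pyRange 4 (n + 1) 1).toFinset.filter
          (fun d => n % d = 0 ∧ (i ≤ d ∧ i ≤ n / d) ∧ (d = i ∨ n / d = i))
          = (if 4 ≤ i then ({i} : Finset Int) else ∅) := by
        ext d
        rw [hChar d]
        by_cases h4i : 4 ≤ i
        · simp only [if_pos h4i, Finset.mem_singleton]; omega
        · simp only [if_neg h4i, Finset.notMem_empty, iff_false]
          rintro ⟨hd | hd, h4⟩
          · exact h4i (hd ▸ h4)
          · rw [hqi] at hd; exact h4i (hd ▸ h4)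
      have e1 : (if n / i ≠ i ∧ 4 ≤ n / i then n / i else 0) = 0 :=
        if_neg (fun hc => hc.1 hqi)
      rw [hNew, e1]
      by_cases h4i : 4 ≤ i
      · rw [if_pos h4i, if_pos h4i, Finset.sum_singleton]; ring
      · rw [if_neg h4i, if_neg h4i, Finset.sum_empty]; ring
    · have hilt : i < n / i := by omega
      by_cases h4q : 4 ≤ n / i
      · have hNew : (PySem.List.pyRange 4 (n + 1) 1).toFinset.filter
            (fun d => n % d = 0 ∧ (i ≤ d ∧ i ≤ n / d) ∧ (d = i ∨ n / d = i))
            = (if 4 ≤ i then ({i, n / i} : Finset Int) else {n / i}) := by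
          ext d
          rw [hChar d]
          by_cases h4i : 4 ≤ i
          · simp only [if_pos h4i, Finset.mem_insert, Finset.mem_singleton]; omega
          · simp only [if_neg h4i, Finset.mem_singleton]; omega
        have e1 : (if n / i ≠ i ∧ 4 ≤ n / i then n / i else 0) = n / i :=
          if_pos ⟨hqi, h4q⟩
        rw [hNew, e1]
        by_cases h4i : 4 ≤ i
        · rw [if_pos h4i, if_pos h4i, Finset.sum_pair (show i ≠ n / i by omega)]; ring
        · rw [if_neg h4i, if_neg h4i, Finset.sum_singleton]; ring
      · have h4i : ¬ 4 ≤ i := by omega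
        have hNew : (PySem.List.pyRange 4 (n + 1) 1).toFinset.filter
            (fun d => n % d = 0 ∧ (i ≤ d ∧ i ≤ n / d) ∧ (d = i ∨ n / d = i))
            = (∅ : Finset Int) := by
          ext d
          rw [hChar d]
          simp only [Finset.notMem_empty, iff_false]
          rintro ⟨hd | hd, h4⟩
          · exact h4i (hd ▸ h4)
          · exact h4q (hd ▸ h4)
        have e1 : (if n / i ≠ i ∧ 4 ≤ n / i then n / i else 0) = 0 :=
          if_neg (show ¬(n / i ≠ i ∧ 4 ≤ n / i) from fun hc => h4q hc.2)
        rw [hNew, Finset.sum_empty, e1, if_neg h4i]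
        ring
  · have hNew : (PySem.List.pyRange 4 (n + 1) 1).toFinset.filter
        (fun d => n % d = 0 ∧ (i ≤ d ∧ i ≤ n / d) ∧ (d = i ∨ n / d = i))
        = (∅ : Finset Int) := by
      ext d
      simp only [Finset.mem_filter, List.mem_toFinset, PySem.List.mem_pyRange_one,
        Finset.notMem_empty, iff_false]
      rintro ⟨⟨h4, hdn⟩, hm, ⟨h1, h2⟩, hd | hd⟩
      · exact hmod (hd ▸ hm)
      · have hddvd : d ∣ n := Int.dvd_of_emod_eq_zero hm
        have : d * i = n := by
          have := Int.mul_ediv_cancel' hddvd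
          rw [hd] at this; exact this
        exact hmod (Int.emod_eq_zero_of_dvd ⟨d, by linarith [mul_comm d i]⟩)
    rw [hNew, Finset.sum_empty, if_neg hmod]
    ring

-- B's body adds pvContrib to the accumulator
theorem pvStepVal (n i t : Int) (hipos : (0:Int) < i) :
    (if PySem.Int.mod n i == 0 then
      (if 4 ≤ i then t + i else t) +
        (if PySem.Int.floordiv n i ≠ i ∧ 4 ≤ PySem.Int.floordiv n i
         then PySem.Int.floordiv n i else 0)
     else t) = t + pvContrib n i := by
  rw [PySem.Int.mod_eq_emod_of_pos hipos, PySem.Int.floordiv_eq_ediv_of_pos hipos,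
    pvContrib]
  by_cases hmod : n % i = 0
  · rw [if_pos (by simp [hmod]), if_pos hmod]
    by_cases h4i : 4 ≤ i
    · rw [if_pos h4i, if_pos h4i]; ring
    · rw [if_neg h4i, if_neg h4i]; ring
  · rw [if_neg (by simp [hmod]), if_neg hmod]; ring

theorem pvBLoop_inv (n : Int) :
    ∀ (fuel : Nat) (i t : Int), 1 ≤ i → (n + 1 - i).toNat ≤ fuel →
      pvBLoop fuel n i t = t + ∑ d ∈ pvT n i, d := by
  intro fuel
  induction fuel with
  | zero =>
    intro i t hi hk
    have hni : n < i := by omega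
    have hlt : n < i * i := by nlinarith
    rw [pvBLoop, pvT_empty n i hi hlt]
    simp
  | succ fuel ih =>
    intro i t hi hk
    rw [pvBLoop]
    by_cases hii : i * i ≤ n
    · have hile : i ≤ n := by nlinarith
      rw [if_pos hii, ih (i + 1) _ (by omega) (by omega),
        pvStepVal n i t hi, pvStep n i hi hii]
      ring
    · have hlt : n < i * i := by omega
      rw [if_neg hii, pvT_empty n i hi hlt]
      simp

-- fold of A's step accumulates the filtered sum
theorem pvFoldA (n : Int) :
    ∀ (l : List Int) (a : Int),
      l.foldl
        (fun s i =>
          if PySem.Int.mod n i == 0 then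
            if (PySem.List.pyRange 4 (i + 1) 1).any (fun j => PySem.Int.mod i j == 0)
            then s + i else s
          else s) a
      = a + ((l.filter (fun i =>
          PySem.Int.mod n i == 0 &&
          (PySem.List.pyRange 4 (i + 1) 1).any (fun j => PySem.Int.mod i j == 0))).sum) := by
  intro l
  induction l with
  | nil => intro a; simp
  | cons x xs ih =>
    intro a
    simp only [List.foldl_cons, List.filter_cons]
    cases h1 : (PySem.Int.mod n x == 0) <;>
      cases h2 : ((PySem.List.pyRange 4 (x + 1) 1).any (fun j => PySem.Int.mod x j == 0)) <;>
        (simp only [Bool.false_and, Bool.true_and, Bool.and_self, if_true, if_false,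
          Bool.false_eq_true, List.sum_cons, ih]; try ring)

-- on 4 ≤ i, the inner scan always fires (i divides itself)
theorem pvInner (i : Int) (h4 : 4 ≤ i) :
    ((PySem.List.pyRange 4 (i + 1) 1).any (fun j => PySem.Int.mod i j == 0)) = true := by
  rw [List.any_eq_true]
  refine ⟨i, ?_, ?_⟩
  · rw [PySem.List.mem_pyRange_one]; omega
  · rw [PySem.Int.mod_eq_emod_of_pos (show (0:Int) < i by omega)]
    simp

theorem sumA (n : Int) :
    sum_divider n = ((PySem.List.pyRange 4 (n + 1) 1).filter
      (fun i => PySem.Int.mod n i == 0)).sum := by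
  rw [sum_divider, pvFoldA, zero_add]
  congr 1
  apply List.filter_congr
  intro i hi
  rw [PySem.List.mem_pyRange_one] at hi
  rw [pvInner i hi.1, Bool.and_true]

theorem listToFinset (n : Int) :
    ((PySem.List.pyRange 4 (n + 1) 1).filter
      (fun i => PySem.Int.mod n i == 0)).sum = ∑ d ∈ pvT n 1, d := by
  have hnd : ((PySem.List.pyRange 4 (n + 1) 1).filter
      (fun i => PySem.Int.mod n i == 0)).Nodup :=
    (PySem.List.nodup_pyRange_one 4 (n + 1)).filter _
  rw [← List.map_id (((PySem.List.pyRange 4 (n + 1) 1)).filter _),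
    ← List.sum_toFinset _ hnd]
  apply Finset.sum_congr _ (fun _ _ => rfl)
  ext d
  simp only [List.mem_toFinset, List.mem_filter, PySem.List.mem_pyRange_one, mem_pvT]
  constructor
  · rintro ⟨⟨h4, hdn⟩, hm⟩
    have hdpos : (0:Int) < d := by omega
    rw [PySem.Int.mod_eq_emod_of_pos hdpos] at hm
    simp only [beq_iff_eq] at hm
    have hdvd : d ∣ n := Int.dvd_of_emod_eq_zero hm
    have hq1 : 1 ≤ n / d := by
      rw [Int.le_ediv_iff_mul_le hdpos]; omega
    exact ⟨⟨h4, hdn⟩, hm, by omega, hq1⟩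
  · rintro ⟨⟨h4, hdn⟩, hm, _⟩
    have hdpos : (0:Int) < d := by omega
    refine ⟨⟨h4, hdn⟩, ?_⟩
    rw [PySem.Int.mod_eq_emod_of_pos hdpos]
    simp [hm]

-- ===== VERDICT (by name: the statement is the Claim_ definition above) =====
theorem sum_divider_spec : Claim_equal_sum_divider := by
  intro n _
  unfold Spec_sum_divider sum_divider_alt
  by_cases hn : n < 4
  · rw [if_pos hn, sum_divider, PySem.List.pyRange_one_eq_nil (by omega)]
    rfl
  · rw [if_neg hn, pvBLoop_inv n (n + 1).toNat 1 0 le_rfl (by omega),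
      zero_add, sumA, listToFinset]
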